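-- pv_equiv track=rewrite | github.com/SpinlabMSU-user/RadiationCalculator | radiation_calculator.py | create_decay_order
-- ===== SOURCE A (Python) =====
-- def create_decay_order(master_decay_list):
--     '''
--     Creates order of species in decay tree. parallel species are ordered left
--     to right.
--
--     --Input--
--     master_decay_list: list of all decay chains created using find_decay()
--
--     --Returns--
--     all_species: list of species in order of initial isotope to last
--     '''
--     n = 0 #keep track of which item in decay chains
--     all_species = []
--     longest_chain = 0
--     for chain in master_decay_list:
--         if len(chain) > longest_chain: longest_chain = len(chain)
--
--     while n < longest_chain:
--         for decay_chain in master_decay_list: #look at each decay chain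
--             try:
--                 if decay_chain[n][0:3] not in all_species:
--                     all_species.append(decay_chain[n][0:3])
--             except:
--                 continue
--         n+=1
--     return all_species
-- ===== SOURCE B (Python) =====
-- def create_decay_order(master_decay_list):
--     """Sort-then-scan: label every species with its (column, row) coordinate in
--     one row-major pass, sort the labels into column-major order, then scan once
--     appending each not-yet-seen 3-char prefix."""
--     labeled = [((col, row), species[0:3])
--                for row, chain in enumerate(master_decay_list)
--                for col, species in enumerate(chain)]
--     labeled.sort(key=lambda item: item[0])
--     all_species = []
--     for _, prefix in labeled:
--         if prefix not in all_species:
--             all_species.append(prefix)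
--     return all_species
-- ===== Notes on version B (the rewrite author's own statement) =====
-- stated objective: alternative
-- what changed: Replaces A's longest-chain scan plus while-loop of repeated indexed passes guarded by a bare except with a sort-then-scan algorithm: one row-major pass labels each species with its (column,row) coordinate, a key-sort puts the labels into column-major order, and a single scan collects unseen 3-char prefixes.
import Mathlib
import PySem

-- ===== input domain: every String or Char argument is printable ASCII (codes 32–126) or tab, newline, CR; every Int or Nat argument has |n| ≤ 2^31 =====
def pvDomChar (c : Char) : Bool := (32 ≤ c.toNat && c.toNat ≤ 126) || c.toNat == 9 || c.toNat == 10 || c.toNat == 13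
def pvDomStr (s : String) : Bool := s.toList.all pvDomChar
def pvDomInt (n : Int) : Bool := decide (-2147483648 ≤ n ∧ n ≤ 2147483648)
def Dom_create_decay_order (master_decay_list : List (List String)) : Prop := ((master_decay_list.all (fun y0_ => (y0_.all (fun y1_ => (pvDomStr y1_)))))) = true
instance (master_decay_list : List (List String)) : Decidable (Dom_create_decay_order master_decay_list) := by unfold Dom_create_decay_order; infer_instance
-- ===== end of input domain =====

-- B replaces A's longest-chain scan and repeated indexed column passes by sort-then-scan:
-- label every species with its (column,row) coordinate, key-sort, one dedup scan (alternative algorithm).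


-- ===== PORT A =====
-- longest_chain loop, then 'while n < longest_chain' over the chains with the bare
-- except swallowing the IndexError of decay_chain[n]
def create_decay_order (master_decay_list : List (List String)) : List String :=
  (List.range (master_decay_list.foldl
      (fun longest_chain chain =>
        if chain.length > longest_chain then chain.length else longest_chain) 0)).foldl
    (fun all_species (n : Nat) =>
      master_decay_list.foldl
        (fun all_species decay_chain =>
          match PySem.List.pyGet? decay_chain (n : Int) with
          | none => all_species  -- IndexError swallowed by the bare except: continue
          | some s =>
            if PySem.Str.slice s (some 0) (some 3) ∈ all_species then all_species
            else all_species ++ [PySem.Str.slice s (some 0) (some 3)])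
        all_species)
    []

-- ===== PORT B =====
-- row-major labelling pass, key-sort into column-major order, one dedup scan
def create_decay_order_alt (master_decay_list : List (List String)) : List String :=
  let labeled : List ((Int × Int) × String) :=
    (PySem.List.enumerate master_decay_list).flatMap (fun rc =>
      (PySem.List.enumerate rc.2).map (fun cs =>
        ((cs.1, rc.1), PySem.Str.slice cs.2 (some 0) (some 3))))
  let sortedLabeled :=
    PySem.List.sorted2 labeled (fun item => item.1.1) (fun item => item.1.2)
  sortedLabeled.foldl
    (fun all_species item =>
      if item.2 ∈ all_species then all_species else all_species ++ [item.2]) []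

-- ===== PRECONDITION & SPEC =====
def Spec_create_decay_order (master_decay_list : List (List String)) (out : List String) : Prop := out = create_decay_order_alt master_decay_list
instance (master_decay_list : List (List String)) (out : List String) : Decidable (Spec_create_decay_order master_decay_list out) := by unfold Spec_create_decay_order; infer_instance

-- ===== CLAIM (what is proved, stated in full; the proofs are below) =====
def Claim_equal_create_decay_order : Prop := ∀ (master_decay_list : List (List String)), Dom_create_decay_order master_decay_list → Spec_create_decay_order master_decay_list (create_decay_order master_decay_list)

-- ===== LEMMAS AND PROOFS =====

-- abbreviations used only by the proofs
def pvPfx (s : String) : String := PySem.Str.slice s (some 0) (some 3)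

def pvLongest (m : List (List String)) : Nat :=
  PySem.List.maxD (m.map List.length) (fun x => x) 0

-- column i of the table, with each prefix labelled by its (column, row) coordinate
def pvCol (m : List (List String)) (i : Nat) : List ((Int × Int) × String) :=
  (PySem.List.enumerate m).filterMap (fun rc =>
    (rc.2[i]?).map (fun s => (((i : Int), rc.1), pvPfx s)))

-- the whole table in column-major order, labelled
def pvColTriples (m : List (List String)) : List ((Int × Int) × String) :=
  (List.range (pvLongest m)).flatMap (pvCol m)

-- B's row-major labelled list
def pvRowTriples (m : List (List String)) : List ((Int × Int) × String) :=
  (PySem.List.enumerate m).flatMap (fun rc =>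
    (PySem.List.enumerate rc.2).map (fun cs => ((cs.1, rc.1), pvPfx cs.2)))

-- named copy of the max? accumulator step, so the fold function is a plain constant
def pvMaxStep (acc : Option Nat) (y : List String) : Option Nat :=
  match acc with
  | none => some y.length
  | some mm => if mm < y.length then some y.length else some mm

-- the running accumulator of PySem.List.max? (key = id) is A's running-max loop over the lengths
theorem pv_max_len_foldl (t : List (List String)) (m : Nat) :
    t.foldl pvMaxStep (some m)
    = some (t.foldl (fun acc chain => if chain.length > acc then chain.length else acc) m) := by
  induction t generalizing m with
  | nil => rfl
  | cons c t ih =>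
    simp only [List.foldl_cons, pvMaxStep]
    by_cases h : m < c.length
    · rw [if_pos h, ih, if_pos (show c.length > m from h)]
    · rw [if_neg h, ih, if_neg (show ¬ c.length > m from h)]

-- PySem.List.max? over the mapped lengths is the pvMaxStep fold
theorem pv_max_eq (m : List (List String)) :
    PySem.List.max? (m.map List.length) (fun x => x) = m.foldl pvMaxStep none := by
  induction m using List.reverseRecOn with
  | nil => rfl
  | append_singleton xs x ih =>
    rw [PySem.List.max?] at ih ⊢
    rw [List.map_append, List.foldl_append, List.foldl_append, ih]
    cases xs.foldl pvMaxStep none <;> simp [pvMaxStep]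

-- A's hand-rolled longest-chain loop computes max(map(len, ...), default 0)
theorem pv_longest_eq (m : List (List String)) :
    m.foldl (fun longest_chain chain =>
        if chain.length > longest_chain then chain.length else longest_chain) 0
      = pvLongest m := by
  unfold pvLongest
  rw [PySem.List.maxD, pv_max_eq]
  cases m with
  | nil => rfl
  | cons c t =>
    simp only [List.foldl_cons]
    rw [show (if c.length > 0 then c.length else 0) = c.length from by split <;> omega]
    rw [show pvMaxStep none c = some c.length from rfl]
    rw [pv_max_len_foldl]
    rfl

-- membership in a labelled column
theorem pv_mem_pvCol (m : List (List String)) (i : Nat) (x : (Int × Int) × String) :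
    x ∈ pvCol m i ↔ ∃ (r : Nat) (hr : r < m.length) (hi : i < m[r].length),
      x = (((i : Int), (r : Int)), pvPfx m[r][i]) := by
  unfold pvCol
  simp only [List.mem_filterMap, PySem.List.mem_enumerate_iff, Option.map_eq_some_iff]
  constructor
  · rintro ⟨rc, ⟨r, hr, rfl⟩, s, hs, rfl⟩
    obtain ⟨hi, hsv⟩ := List.getElem?_eq_some_iff.1 hs
    exact ⟨r, hr, hi, by simp [hsv]⟩
  · rintro ⟨r, hr, hi, rfl⟩
    exact ⟨((r : Int), m[r]), ⟨r, hr, by simp⟩, m[r][i],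
      List.getElem?_eq_some_iff.2 ⟨hi, rfl⟩, by simp⟩

-- every chain is at most pvLongest long
theorem pv_len_le_longest (m : List (List String)) (chain : List String) (h : chain ∈ m) :
    chain.length ≤ pvLongest m := by
  unfold pvLongest PySem.List.maxD
  cases hmx : PySem.List.max? (m.map List.length) (fun x => x) with
  | none =>
    rw [PySem.List.max?_eq_none_iff] at hmx
    simp [List.map_eq_nil_iff.1 hmx] at h
  | some mx =>
    exact PySem.List.max?_isMax hmx chain.length (List.mem_map_of_mem h)

-- membership in B's row-major labelled list
theorem pv_mem_pvRowTriples (m : List (List String)) (x : (Int × Int) × String) :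
    x ∈ pvRowTriples m ↔ ∃ (r : Nat) (hr : r < m.length) (c : Nat) (hc : c < m[r].length),
      x = (((c : Int), (r : Int)), pvPfx m[r][c]) := by
  unfold pvRowTriples
  simp only [List.mem_flatMap, List.mem_map, PySem.List.mem_enumerate_iff]
  constructor
  · rintro ⟨rc, ⟨r, hr, rfl⟩, cs, ⟨c, hc, rfl⟩, rfl⟩
    exact ⟨r, hr, c, by simpa using hc, by simp [pvPfx]⟩
  · rintro ⟨r, hr, c, hc, rfl⟩
    exact ⟨((r : Int), m[r]), ⟨r, hr, by simp⟩, ((c : Int), m[r][c]), ⟨c, hc, by simp⟩,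
      by simp [pvPfx]⟩

-- elements of a labelled column carry that column index
theorem pv_fst_of_mem_pvCol (m : List (List String)) (i : Nat) (x : (Int × Int) × String)
    (h : x ∈ pvCol m i) : x.1.1 = (i : Int) := by
  obtain ⟨r, hr, hi, rfl⟩ := (pv_mem_pvCol m i x).1 h
  rfl

-- the column-major labelled table has strictly lex-increasing labels
theorem pv_pairwise_colTriples (m : List (List String)) :
    (pvColTriples m).Pairwise
      (fun a b => toLex (a.1.1, a.1.2) < toLex (b.1.1, b.1.2)) := by
  unfold pvColTriples
  rw [List.flatMap_def, List.pairwise_flatten]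
  constructor
  · intro l hl
    obtain ⟨i, _, rfl⟩ := List.mem_map.1 hl
    unfold pvCol
    rw [List.pairwise_filterMap]
    refine (PySem.List.pairwise_lt_enumerate m 0).imp_of_mem ?_
    rintro p q hp hq hpq b hb b' hb'
    simp only [Option.map_eq_some_iff] at hb hb'
    obtain ⟨s, _, rfl⟩ := hb
    obtain ⟨s', _, rfl⟩ := hb'
    exact Prod.Lex.toLex_lt_toLex.2 (Or.inr ⟨rfl, hpq⟩)
  · rw [List.pairwise_map]
    refine List.pairwise_lt_range.imp_of_mem ?_
    intro i j _ _ hij x hx y hy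
    exact Prod.Lex.toLex_lt_toLex.2 (Or.inl (by
      rw [pv_fst_of_mem_pvCol m i x hx, pv_fst_of_mem_pvCol m j y hy]
      exact_mod_cast hij))

-- labels are distinct in the row-major list, so it has no duplicates
theorem pv_nodup_rowTriples (m : List (List String)) : (pvRowTriples m).Nodup := by
  unfold pvRowTriples
  rw [List.flatMap_def]
  refine List.pairwise_flatten.mpr ⟨?_, ?_⟩
  · intro l hl
    obtain ⟨rc, _, rfl⟩ := List.mem_map.1 hl
    rw [List.pairwise_map]
    refine (PySem.List.pairwise_lt_enumerate rc.2 0).imp ?_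
    intro p q hpq heq
    exact absurd (congrArg (fun z => z.1.1) heq) (by simpa using hpq.ne)
  · rw [List.pairwise_map]
    refine (PySem.List.pairwise_lt_enumerate m 0).imp ?_
    rintro p q hpq x hx y hy
    obtain ⟨cs, _, rfl⟩ := List.mem_map.1 hx
    obtain ⟨cs', _, rfl⟩ := List.mem_map.1 hy
    intro heq
    exact absurd (congrArg (fun z => z.1.2) heq) (by simpa using hpq.ne)

theorem pv_nodup_colTriples (m : List (List String)) : (pvColTriples m).Nodup :=
  (pv_pairwise_colTriples m).imp (fun h => by
    intro heq; subst heq; exact lt_irrefl _ h)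

-- same elements, both duplicate-free: the two labelled tables are permutations
theorem pv_perm (m : List (List String)) : (pvColTriples m).Perm (pvRowTriples m) := by
  rw [List.perm_ext_iff_of_nodup (pv_nodup_colTriples m) (pv_nodup_rowTriples m)]
  intro x
  rw [pv_mem_pvRowTriples]
  unfold pvColTriples
  simp only [List.mem_flatMap, List.mem_range]
  constructor
  · rintro ⟨i, _, hx⟩
    obtain ⟨r, hr, hi, rfl⟩ := (pv_mem_pvCol m i x).1 hx
    exact ⟨r, hr, i, hi, rfl⟩
  · rintro ⟨r, hr, c, hc, rfl⟩
    exact ⟨c, lt_of_lt_of_le hc (pv_len_le_longest m m[r] (List.getElem_mem hr)),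
      (pv_mem_pvCol m c _).2 ⟨r, hr, hc, rfl⟩⟩

-- Python's tuple sort is the sort by the lexicographic product key
theorem pv_sorted2_eq_sorted_lex (xs : List ((Int × Int) × String)) :
    PySem.List.sorted2 xs (fun item => item.1.1) (fun item => item.1.2)
      = PySem.List.sorted xs (fun item => toLex (item.1.1, item.1.2)) := by
  rw [PySem.List.sorted_eq_foldl_insertBy]
  show List.foldl (fun acc x => PySem.List.insertBy (fun a b =>
      decide (a.1.1 < b.1.1) || (!decide (b.1.1 < a.1.1) && decide (a.1.2 < b.1.2))) x acc) [] xs = _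
  have hbef : (fun (a b : (Int × Int) × String) =>
      decide (a.1.1 < b.1.1) || (!decide (b.1.1 < a.1.1) && decide (a.1.2 < b.1.2)))
      = (fun a b => decide (toLex (a.1.1, a.1.2) < toLex (b.1.1, b.1.2))) := by
    funext a b
    rcases lt_trichotomy a.1.1 b.1.1 with h | h | h
    · simp [h, asymm h, Prod.Lex.toLex_lt_toLex]
    · simp [h, Prod.Lex.toLex_lt_toLex]
    · simp [asymm h, ne_of_gt h, Prod.Lex.toLex_lt_toLex]
      exact fun hle => absurd hle (not_le.mpr h)
  rw [hbef]

-- B's sort rearranges the row-major table into exactly the column-major table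
theorem pv_sorted_eq (m : List (List String)) :
    PySem.List.sorted2 (pvRowTriples m) (fun item => item.1.1) (fun item => item.1.2)
      = pvColTriples m := by
  rw [pv_sorted2_eq_sorted_lex]
  exact PySem.List.sorted_eq_of_perm_of_pairwise_lt _ _ _ (pv_perm m)
    (pv_pairwise_colTriples m)

-- A's inner for-loop over the chains at column n, generalized over the enumerate start
theorem pv_inner_aux (m : List (List String)) (s : Int) (n : Nat) (acc : List String) :
    m.foldl
      (fun all_species decay_chain =>
        match PySem.List.pyGet? decay_chain (n : Int) with
        | none => all_species
        | some s =>
          if PySem.Str.slice s (some 0) (some 3) ∈ all_species then all_species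
          else all_species ++ [PySem.Str.slice s (some 0) (some 3)])
      acc
    = ((PySem.List.enumerate m s).filterMap (fun rc =>
        (rc.2[n]?).map (fun str => (((n : Int), rc.1), pvPfx str)))).foldl
        (fun all p => if p.2 ∈ all then all else all ++ [p.2]) acc := by
  simp only [PySem.List.pyGet?_natCast]
  induction m generalizing s acc with
  | nil => rfl
  | cons c t ih =>
    rw [PySem.List.enumerate_cons]
    simp only [List.foldl_cons, List.filterMap_cons]
    cases h : getElem? c n with
    | none => simp only [Option.map_none]; exact ih (s + 1) acc
    | some str =>
      simp only [Option.map_some, List.foldl_cons]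
      exact ih (s + 1) _

-- A's inner for-loop over the chains at column n is a fold over that column's prefixes
theorem pv_inner_eq (m : List (List String)) (n : Nat) (acc : List String) :
    m.foldl
      (fun all_species decay_chain =>
        match PySem.List.pyGet? decay_chain (n : Int) with
        | none => all_species
        | some s =>
          if PySem.Str.slice s (some 0) (some 3) ∈ all_species then all_species
          else all_species ++ [PySem.Str.slice s (some 0) (some 3)])
      acc
    = (pvCol m n).foldl
        (fun all p => if p.2 ∈ all then all else all ++ [p.2]) acc :=
  pv_inner_aux m 0 n acc

theorem create_decay_order_eq (m : List (List String)) :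
    create_decay_order m = create_decay_order_alt m := by
  unfold create_decay_order create_decay_order_alt
  rw [pv_longest_eq m]
  have hout := PySem.List.foldl_congr_mem
      (l := List.range (pvLongest m))
      (init := ([] : List String))
      (f := fun all_species (n : Nat) =>
        m.foldl
          (fun all_species decay_chain =>
            match PySem.List.pyGet? decay_chain (n : Int) with
            | none => all_species
            | some s =>
              if PySem.Str.slice s (some 0) (some 3) ∈ all_species then all_species
              else all_species ++ [PySem.Str.slice s (some 0) (some 3)])
          all_species)
      (g := fun all (n : Nat) => (pvCol m n).foldl
          (fun all p => if p.2 ∈ all then all else all ++ [p.2]) all)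
      (fun acc n _ => pv_inner_eq m n acc)
  rw [hout, ← List.foldl_flatMap]
  show _ = List.foldl
      (fun all_species item => if item.2 ∈ all_species then all_species else all_species ++ [item.2]) []
      (PySem.List.sorted2 (pvRowTriples m) (fun item => item.1.1) (fun item => item.1.2))
  rw [pv_sorted_eq m]
  rfl

-- ===== VERDICT (by name: the statement is the Claim_ definition above) =====
theorem create_decay_order_spec : Claim_equal_create_decay_order := by
  intro m _
  unfold Spec_create_decay_order
  exact create_decay_order_eq m
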